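-- pv_equiv track=rewrite | github.com/shanrichard/browserFairy | browserfairy/data/site_manager.py | group_hostnames
-- ===== SOURCE A (Python) =====
-- from typing import Dict, List, Optional, Generator, Any
--
-- def normalize_hostname(hostname: str) -> str:
--     """极简hostname规范化 - 只处理www和m前缀"""
--     if not hostname:
--         return "unknown"
--
--     hostname = hostname.lower()
--
--     # 只移除www和m前缀，不处理api等（避免误合并不同服务）
--     if hostname.startswith("www."):
--         hostname = hostname[4:]
--     elif hostname.startswith("m."):
--         hostname = hostname[2:]
--
--     return hostname
--
-- def group_hostnames(hostnames: List[str]) -> Dict[str, List[str]]: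
--     """简单分组 - 仅用于展示汇总，不改动文件结构"""
--     groups = {}
--     for hostname in hostnames:
--         normalized = normalize_hostname(hostname)
--         if normalized not in groups:
--             groups[normalized] = []
--         groups[normalized].append(hostname)
--     return groups
-- ===== SOURCE B (Python) =====
-- def normalize_hostname(hostname: str) -> str:
--     if not hostname:
--         return "unknown"
--     hostname = hostname.lower()
--     if hostname.startswith("www."):
--         hostname = hostname[4:]
--     elif hostname.startswith("m."):
--         hostname = hostname[2:]
--     return hostname
--
-- def group_hostnames(hostnames):
--     # two-pass: normalize once, take the distinct keys in first-seen order,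
--     # then build each group with one filtering comprehension per key
--     norms = list(map(normalize_hostname, hostnames))
--     keys = dict.fromkeys(norms)
--     return {k: [h for n, h in zip(norms, hostnames) if n == k] for k in keys}
-- ===== Notes on version B (the rewrite author's own statement) =====
-- stated objective: alternative
-- what changed: Replaces A's single-pass dict accumulation (create-key-then-append per element) with a two-pass decomposition: normalize every hostname once, take the distinct normalized keys in first-seen order via dict.fromkeys, then build each group with one filtering comprehension per key.
import Mathlib
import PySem

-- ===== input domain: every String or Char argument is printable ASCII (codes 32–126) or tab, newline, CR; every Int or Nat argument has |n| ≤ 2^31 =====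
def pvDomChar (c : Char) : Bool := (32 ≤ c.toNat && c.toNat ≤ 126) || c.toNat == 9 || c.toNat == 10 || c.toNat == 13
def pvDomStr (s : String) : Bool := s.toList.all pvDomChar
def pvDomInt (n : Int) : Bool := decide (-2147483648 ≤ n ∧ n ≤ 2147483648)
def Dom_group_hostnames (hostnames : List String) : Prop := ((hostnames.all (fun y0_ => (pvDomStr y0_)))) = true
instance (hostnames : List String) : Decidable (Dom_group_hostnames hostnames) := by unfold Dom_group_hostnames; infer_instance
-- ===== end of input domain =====

-- B replaces A's single-pass dict accumulation with a two-pass decomposition (distinct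
-- normalized keys first, then one filter per key); objective: alternative, not faster.

-- ===== PORT A =====
def normalize_hostname (hostname : String) : String :=
  if hostname = "" then "unknown"
  else
    let h := PySem.Str.lower hostname
    if PySem.Str.startswith h "www." then PySem.Str.slice h (some 4) none
    else if PySem.Str.startswith h "m." then PySem.Str.slice h (some 2) none
    else h

def group_hostnames (hostnames : List String) : List (String × List String) :=
  (hostnames.foldl (fun groups hostname =>
      let normalized := normalize_hostname hostname
      -- if normalized not in groups: groups[normalized] = []
      let groups := if groups.contains normalized then groups else groups.insert normalized ([] : List String)
      -- groups[normalized].append(hostname)  (= groups[normalized] = groups[normalized] + [hostname])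
      groups.insert normalized (groups.getD normalized [] ++ [hostname])
    ) PySem.Dict.empty).items

-- ===== PORT B =====
def group_hostnames_alt (hostnames : List String) : List (String × List String) :=
  let norms := hostnames.map normalize_hostname
  let keys := PySem.List.dedup norms                                -- dict.fromkeys(norms)
  keys.map (fun k => (k, ((norms.zip hostnames).filter (fun p => p.1 == k)).map (·.2)))

-- ===== PRECONDITION & SPEC =====
def Spec_group_hostnames (hostnames : List String) (out : List (String × List String)) : Prop := out = group_hostnames_alt hostnames
instance (hostnames : List String) (out : List (String × List String)) : Decidable (Spec_group_hostnames hostnames out) := by unfold Spec_group_hostnames; infer_instance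

-- ===== CLAIM (what is proved, stated in full; the proofs are below) =====
def Claim_equal_group_hostnames : Prop := ∀ (hostnames : List String), Dom_group_hostnames hostnames → Spec_group_hostnames hostnames (group_hostnames hostnames)

-- ===== LEMMAS AND PROOFS =====

-- A's dict after the fold over l IS the dict B builds: distinct normalized keys in
-- first-seen order, each paired with the sublist of hostnames normalizing to it.
lemma grp_inv (l : List String) :
    l.foldl (fun groups hostname =>
      let normalized := normalize_hostname hostname
      let groups := if groups.contains normalized then groups else groups.insert normalized ([] : List String)
      groups.insert normalized (groups.getD normalized [] ++ [hostname])) PySem.Dict.empty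
    = PySem.Dict.mk ((PySem.List.dedup (l.map normalize_hostname)).map
        (fun k => (k, l.filter (fun h => normalize_hostname h == k)))) := by
  induction l using List.reverseRecOn with
  | nil => rfl
  | append_singleton l x ih =>
    rw [List.foldl_append, ih]
    simp only [List.foldl_cons, List.foldl_nil]
    set n := normalize_hostname x with hn
    set K := PySem.List.dedup (l.map normalize_hostname) with hK
    set D := PySem.Dict.mk (K.map (fun k => (k, l.filter (fun h => normalize_hostname h == k)))) with hD
    have hkeys : D.keys = K := by
      rw [hD, PySem.Dict.keys_mk, List.map_map]; exact List.map_id K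
    have hnodup : D.keys.Nodup := by
      rw [hkeys, hK, PySem.List.dedup_eq_ofList]; exact PySem.Set.nodup_ofList _
    have hdedup : PySem.List.dedup ((l ++ [x]).map normalize_hostname)
        = if n ∈ l.map normalize_hostname then K else K ++ [n] := by
      rw [List.map_append, List.map_singleton, PySem.List.dedup_eq_ofList,
        PySem.Set.ofList_append_singleton, PySem.Set.add, ← hn]
      rw [PySem.Set.contains_eq_decide]
      rw [hK, PySem.List.dedup_eq_ofList]
      by_cases hm : n ∈ l.map normalize_hostname
      · simp [hm, PySem.Set.mem_ofList]
      · simp [hm, PySem.Set.mem_ofList]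
    by_cases hmem : n ∈ l.map normalize_hostname
    · have hcont : D.contains n = true := by
        rw [PySem.Dict.contains_eq_decide_mem_keys, hkeys]
        simp [hK, hmem]
      rw [if_pos hcont]
      have hget : D.getD n [] = l.filter (fun h => normalize_hostname h == n) := by
        apply PySem.Dict.getD_of_mem_items _ _ hnodup
        rw [hD]
        exact List.mem_map.2 ⟨n, by rw [hK, PySem.List.mem_dedup]; exact hmem, rfl⟩
      apply PySem.Dict.ext
      rw [PySem.Dict.items_insert_of_contains _ _ hcont, hget, hD]
      rw [hdedup, if_pos hmem]
      simp only [List.map_map]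
      apply List.map_congr_left
      intro k hk
      by_cases hkn : k = n
      · subst hkn
        simp [List.filter_append, List.filter, hn]
      · have : (normalize_hostname x == k) = false := by
          simp [← hn]; exact fun h => hkn h.symm
        simp [List.filter_append, List.filter, this, Function.comp,
          show (k == n) = false by simp [hkn]]
    · have hcont : D.contains n = false := by
        rw [PySem.Dict.contains_eq_decide_mem_keys, hkeys]
        simp [hK, hmem]
      rw [if_neg (by simp [hcont])]
      rw [PySem.Dict.getD_insert_self, PySem.Dict.insert_insert_self]
      apply PySem.Dict.ext
      rw [PySem.Dict.items_insert_of_not_contains _ _ hcont, hD]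
      rw [hdedup, if_neg hmem, List.map_append, List.map_singleton]
      congr 1
      · apply List.map_congr_left
        intro k hk
        have hkn : k ≠ n := by
          intro e; subst e
          exact hmem ((PySem.List.mem_dedup _ _).1 (hK ▸ hk))
        have : (normalize_hostname x == k) = false := by
          simp [← hn]; exact fun h => hkn h.symm
        simp [List.filter_append, List.filter, this]
      · simp [List.filter_append, List.filter, hn]
        intro a ha e
        exact hmem (List.mem_map.2 ⟨a, ha, e.trans hn.symm⟩)

-- filtering the (norm, hostname) pairs on the key and projecting = filtering the hostnames on their norm
lemma zip_filter_snd (k : String) (l : List String) :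
    (((l.map normalize_hostname).zip l).filter (fun p => p.1 == k)).map (·.2)
      = l.filter (fun h => normalize_hostname h == k) := by
  induction l with
  | nil => rfl
  | cons a t ih =>
    simp only [List.map_cons, List.zip_cons_cons, List.filter]
    by_cases h : (normalize_hostname a == k) <;> simp [h, ih]

-- ===== VERDICT (by name: the statement is the Claim_ definition above) =====
theorem group_hostnames_spec : Claim_equal_group_hostnames := by
  intro hostnames _
  unfold Spec_group_hostnames group_hostnames group_hostnames_alt
  rw [grp_inv]
  exact List.map_congr_left (fun k _ => by rw [zip_filter_snd])
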